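-- pv_equiv track=rewrite | github.com/omarkamali/vocabulous | benchmarks/bench_dict_accumulation.py | _accumulate_chunk
-- ===== SOURCE A (Python) =====
-- def _accumulate_chunk(payload):
--     """Worker function for parallel accumulation."""
--     langs_list, words_list = payload
--     partial_freq = {}
--     partial_langs = set()
--     for lang, words in zip(langs_list, words_list):
--         partial_langs.add(lang)
--         for word in words:
--             if word not in partial_freq:
--                 partial_freq[word] = {}
--             if lang not in partial_freq[word]:
--                 partial_freq[word][lang] = 0
--             partial_freq[word][lang] += 1
--     return partial_freq, partial_langs
-- ===== SOURCE B (Python) =====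
-- def _accumulate_chunk(payload):
--     """Worker function for parallel accumulation (flat pair-counter version)."""
--     langs_list, words_list = payload
--     pair_counts = {}
--     partial_langs = set()
--     for lang, words in zip(langs_list, words_list):
--         partial_langs.add(lang)
--         for word in words:
--             pair_counts[(word, lang)] = pair_counts.get((word, lang), 0) + 1
--     partial_freq = {}
--     for (word, lang), count in pair_counts.items():
--         partial_freq.setdefault(word, {})[lang] = count
--     return partial_freq, partial_langs
-- ===== Notes on version B (the rewrite author's own statement) =====
-- stated objective: alternative
-- what changed: B counts flat (word, lang) pairs in a single dict during the zip pass and then builds the nested per-word dict in a separate second pass over the flat counter's items, instead of A's nested dict-of-dicts updated in place inside the inner loop.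
import Mathlib
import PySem

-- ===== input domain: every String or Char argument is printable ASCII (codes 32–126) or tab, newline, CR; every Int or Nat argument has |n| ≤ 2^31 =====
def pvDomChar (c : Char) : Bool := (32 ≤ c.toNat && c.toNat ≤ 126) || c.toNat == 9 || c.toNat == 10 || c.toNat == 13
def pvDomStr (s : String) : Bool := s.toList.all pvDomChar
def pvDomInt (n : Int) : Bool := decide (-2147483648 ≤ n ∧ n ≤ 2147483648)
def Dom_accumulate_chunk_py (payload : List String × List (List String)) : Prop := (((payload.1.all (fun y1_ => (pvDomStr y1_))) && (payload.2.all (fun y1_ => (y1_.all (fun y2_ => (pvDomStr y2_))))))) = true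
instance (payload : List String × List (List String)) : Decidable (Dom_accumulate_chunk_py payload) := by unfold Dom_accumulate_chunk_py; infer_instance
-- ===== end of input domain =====

-- B replaces A's in-place nested dict-of-dicts by a flat (word, lang) pair counter built in
-- one zip pass, followed by a second pass over the flat counter's items that assembles the
-- nested per-word dict (objective: alternative decomposition, same cost).

-- ===== PORT A =====
-- body of A's inner 'for word in words' loop
def pyAWordStep (lang : String) (freq : PySem.Dict String (PySem.Dict String Int)) (word : String) : PySem.Dict String (PySem.Dict String Int) :=
  let freq := if freq.contains word then freq else freq.insert word PySem.Dict.empty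
  let inner := freq.getD word PySem.Dict.empty
  let inner := if inner.contains lang then inner else inner.insert lang 0
  freq.insert word (inner.insert lang (inner.getD lang 0 + 1))

def accumulate_chunk_py (payload : List String × List (List String)) : (List (String × List (String × Int))) × List String :=
  let r := (payload.1.zip payload.2).foldl
    (fun (st : PySem.Dict String (PySem.Dict String Int) × PySem.Set String) p =>
      (p.2.foldl (pyAWordStep p.1) st.1, PySem.Set.add st.2 p.1))
    (PySem.Dict.empty, PySem.Set.empty)
  (r.1.items.map (fun q => (q.1, q.2.items)), r.2)

-- ===== PORT B =====
-- body of B's inner loop: pair_counts[(word, lang)] = pair_counts.get((word, lang), 0) + 1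
def pyBPairStep (lang : String) (d : PySem.Dict (String × String) Int) (word : String) : PySem.Dict (String × String) Int :=
  d.insert (word, lang) (d.getD (word, lang) 0 + 1)

-- body of B's second pass: partial_freq.setdefault(word, {})[lang] = count
def pyBNestStep (nd : PySem.Dict String (PySem.Dict String Int)) (q : (String × String) × Int) : PySem.Dict String (PySem.Dict String Int) :=
  let nd := nd.setdefault q.1.1 PySem.Dict.empty
  nd.insert q.1.1 ((nd.getD q.1.1 PySem.Dict.empty).insert q.1.2 q.2)

def accumulate_chunk_py_alt (payload : List String × List (List String)) : (List (String × List (String × Int))) × List String :=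
  let r := (payload.1.zip payload.2).foldl
    (fun (st : PySem.Dict (String × String) Int × PySem.Set String) p =>
      (p.2.foldl (pyBPairStep p.1) st.1, PySem.Set.add st.2 p.1))
    (PySem.Dict.empty, PySem.Set.empty)
  let partial_freq := r.1.items.foldl pyBNestStep PySem.Dict.empty
  (partial_freq.items.map (fun q => (q.1, q.2.items)), r.2)

-- ===== PRECONDITION & SPEC =====
def Spec_accumulate_chunk_py (payload : List String × List (List String)) (out : (List (String × List (String × Int))) × List String) : Prop := out = accumulate_chunk_py_alt payload
instance (payload : List String × List (List String)) (out : (List (String × List (String × Int))) × List String) : Decidable (Spec_accumulate_chunk_py payload out) := by unfold Spec_accumulate_chunk_py; infer_instance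

-- ===== CLAIM (what is proved, stated in full; the proofs are below) =====
def Claim_equal_accumulate_chunk_py : Prop := ∀ (payload : List String × List (List String)), Dom_accumulate_chunk_py payload → Spec_accumulate_chunk_py payload (accumulate_chunk_py payload)

-- ===== LEMMAS AND PROOFS =====

-- the flat event stream: one (word, lang) pair per word occurrence, in traversal order
def pvEvents (payload : List String × List (List String)) : List (String × String) :=
  (payload.1.zip payload.2).flatMap (fun p => p.2.map (fun w => (w, p.1)))

-- langs seen (with multiplicity) for one word, in order
def pvLangsOf (ev : List (String × String)) (w : String) : List String :=
  (ev.filter (fun e => e.1 == w)).map (fun e => e.2)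

-- A's loop body in normal form
def pvAStepN (d : PySem.Dict String (PySem.Dict String Int)) (e : String × String) : PySem.Dict String (PySem.Dict String Int) :=
  d.insert e.1 ((d.getD e.1 PySem.Dict.empty).insert e.2 ((d.getD e.1 PySem.Dict.empty).getD e.2 0 + 1))

-- B's second-pass body in normal form
def pvBStepN (nd : PySem.Dict String (PySem.Dict String Int)) (q : (String × String) × Int) : PySem.Dict String (PySem.Dict String Int) :=
  nd.insert q.1.1 ((nd.getD q.1.1 PySem.Dict.empty).insert q.1.2 q.2)

theorem pyAWordStep_eq (d : PySem.Dict String (PySem.Dict String Int)) (e : String × String) :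
    pyAWordStep e.2 d e.1 = pvAStepN d e := by
  unfold pyAWordStep pvAStepN
  by_cases hc : d.contains e.1 = true
  · simp only [hc, if_true]
    by_cases hl : (d.getD e.1 PySem.Dict.empty).contains e.2 = true
    · simp [hl]
    · simp only [Bool.not_eq_true] at hl
      simp only [hl, Bool.false_eq_true, if_false]
      rw [PySem.Dict.getD_insert_self, PySem.Dict.insert_insert_self,
        PySem.Dict.getD_of_not_contains _ _ hl]
  · simp only [Bool.not_eq_true] at hc
    simp only [hc, Bool.false_eq_true, if_false]
    rw [PySem.Dict.getD_insert_self, PySem.Dict.insert_insert_self,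
      PySem.Dict.getD_of_not_contains _ _ hc, PySem.Dict.contains_empty]
    simp only [Bool.false_eq_true, if_false]
    rw [PySem.Dict.getD_insert_self, PySem.Dict.insert_insert_self, PySem.Dict.getD_empty]

theorem pyBNestStep_eq (nd : PySem.Dict String (PySem.Dict String Int)) (q : (String × String) × Int) :
    pyBNestStep nd q = pvBStepN nd q := by
  unfold pyBNestStep pvBStepN
  by_cases hc : nd.contains q.1.1 = true
  · rw [PySem.Dict.setdefault_of_contains _ _ hc]
  · simp only [Bool.not_eq_true] at hc
    rw [PySem.Dict.setdefault_of_not_contains _ _ hc]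
    simp only [PySem.Dict.getD_insert_self, PySem.Dict.insert_insert_self,
      PySem.Dict.getD_of_not_contains _ _ hc]

-- a nested zip/words foldl is the foldl over the flattened event stream
theorem pv_foldl_zip_flatMap {σ : Type} (g : String → σ → String → σ)
    (zs : List (String × List String)) (s : σ) :
    zs.foldl (fun st p => p.2.foldl (g p.1) st) s
      = (zs.flatMap (fun p => p.2.map (fun w => (w, p.1)))).foldl (fun st e => g e.2 st e.1) s := by
  induction zs generalizing s with
  | nil => rfl
  | cons p t ih =>
    simp only [List.foldl_cons, List.flatMap_cons, List.foldl_append, List.foldl_map, ih]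

-- ofList commutes with filter
theorem pv_ofList_filter {α : Type} [BEq α] [LawfulBEq α] (p : α → Bool) (l : List α) :
    PySem.Set.ofList (l.filter p) = (PySem.Set.ofList l).filter p := by
  induction l with
  | nil => rfl
  | cons x t ih =>
    by_cases h : p x = true
    · rw [List.filter_cons_of_pos h, PySem.Set.ofList_cons, PySem.Set.ofList_cons,
        List.filter_cons_of_pos h, PySem.Set.discard.eq_1, PySem.Set.discard.eq_1, ih,
        List.filter_filter, List.filter_filter]
      exact congrArg _ (List.filter_congr fun a _ => Bool.and_comm _ _)
    · simp only [Bool.not_eq_true] at h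
      rw [List.filter_cons_of_neg (by simp [h]), PySem.Set.ofList_cons,
        PySem.Set.discard.eq_1, List.filter_cons_of_neg (by simp [h]), ih, List.filter_filter]
      refine List.filter_congr (fun a _ => ?_)
      by_cases hpa : p a = true
      · have hax : (a == x) = false := by
          refine beq_eq_false_iff_ne.mpr (fun h' => ?_)
          rw [h'] at hpa; rw [h] at hpa; exact Bool.false_ne_true hpa
        simp [hpa, hax]
      · simp only [Bool.not_eq_true] at hpa
        simp [hpa]

-- ofList commutes with an injective-on-the-list map
theorem pv_ofList_map_inj {α β : Type} [BEq α] [LawfulBEq α] [BEq β] [LawfulBEq β]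
    (f : α → β) (l : List α) (hinj : ∀ a ∈ l, ∀ b ∈ l, f a = f b → a = b) :
    PySem.Set.ofList (l.map f) = (PySem.Set.ofList l).map f := by
  induction l with
  | nil => rfl
  | cons x t ih =>
    rw [List.map_cons, PySem.Set.ofList_cons, PySem.Set.ofList_cons, List.map_cons,
      ih (fun a ha b hb => hinj a (List.mem_cons_of_mem _ ha) b (List.mem_cons_of_mem _ hb)),
      PySem.Set.discard.eq_1, PySem.Set.discard.eq_1, List.filter_map]
    refine congrArg _ (congrArg _ (List.filter_congr (fun a ha => ?_)))
    have hat : a ∈ x :: t := List.mem_cons_of_mem _ ((PySem.Set.mem_ofList t a).mp ha)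
    simp only [Function.comp]
    by_cases hax : a = x
    · subst hax; simp
    · have h1 : (a == x) = false := by simp [hax]
      have h2 : (f a == f x) = false := by
        refine beq_eq_false_iff_ne.mpr (fun hfe => hax ?_)
        exact hinj a hat x List.mem_cons_self hfe
      simp [h1, h2]

-- auxiliary step for pv_ofList_map_ofList
theorem pv_discard_aux {α β : Type} [BEq α] [LawfulBEq α] [BEq β] [LawfulBEq β]
    (f : α → β) (x : α) (s : List α) :
    (PySem.Set.ofList ((s.filter (fun y => !(y == x))).map f)).filter (fun z => !(z == f x))
      = (PySem.Set.ofList (s.map f)).filter (fun z => !(z == f x)) := by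
  induction s with
  | nil => rfl
  | cons y s' ih =>
    by_cases hyx : y = x
    · subst hyx
      rw [show List.filter (fun a => !(a == y)) (y :: s') = List.filter (fun a => !(a == y)) s'
          from List.filter_cons_of_neg (by simp), ih, List.map_cons, PySem.Set.ofList_cons,
        PySem.Set.discard.eq_1, List.filter_cons_of_neg (by simp), List.filter_filter]
      exact (List.filter_congr fun a _ => (Bool.and_self _).symm)
    · rw [List.filter_cons_of_pos (p := fun a => !(a == x)) (by simp [hyx]), List.map_cons,
        List.map_cons, PySem.Set.ofList_cons, PySem.Set.ofList_cons,
        PySem.Set.discard.eq_1, PySem.Set.discard.eq_1]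
      by_cases hfy : (f y == f x) = true
      · rw [List.filter_cons_of_neg (by simp [eq_of_beq hfy]),
          List.filter_cons_of_neg (by simp [eq_of_beq hfy]),
          List.filter_filter, List.filter_filter]
        have hP : ∀ (m : List β), List.filter (fun a => !(a == f x) && !(a == f y)) m
            = List.filter (fun z => !(z == f x)) m := fun m =>
          List.filter_congr (fun a _ => by rw [eq_of_beq hfy, Bool.and_self])
        rw [hP, hP, ih]
      · have hfy' : (f y == f x) = false := by simpa using hfy
        rw [List.filter_cons_of_pos (by simp [hfy']), List.filter_cons_of_pos (by simp [hfy']),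
          List.filter_filter, List.filter_filter]
        have hsw : ∀ (m : List β), List.filter (fun a => !(a == f x) && !(a == f y)) m
            = List.filter (fun a => !(a == f y)) (List.filter (fun z => !(z == f x)) m) :=
          fun m => by rw [List.filter_filter]; exact List.filter_congr (fun a _ => Bool.and_comm _ _)
        rw [hsw, hsw, ih]

-- deduplicating before mapping does not change the deduplicated image
theorem pv_ofList_map_ofList {α β : Type} [BEq α] [LawfulBEq α] [BEq β] [LawfulBEq β]
    (f : α → β) (l : List α) :
    PySem.Set.ofList ((PySem.Set.ofList l).map f) = PySem.Set.ofList (l.map f) := by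
  induction l with
  | nil => rfl
  | cons x t ih =>
    rw [PySem.Set.ofList_cons, List.map_cons, PySem.Set.ofList_cons, PySem.Set.discard.eq_1,
      List.map_cons, PySem.Set.ofList_cons, PySem.Set.discard.eq_1, PySem.Set.discard.eq_1,
      ← ih]
    exact congrArg _ (pv_discard_aux f x (PySem.Set.ofList t))

-- getD after a keyed insert-fold: only the entries whose key matches contribute
theorem pv_getD_foldl_insert_filter {κ ν β : Type} [BEq κ] [LawfulBEq κ] [DecidableEq κ]
    (key : β → κ) (f : ν → β → ν) (dflt : ν) (l : List β) (d : PySem.Dict κ ν) (w : κ) :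
    (l.foldl (fun d x => d.insert (key x) (f (d.getD (key x) dflt) x)) d).getD w dflt
      = (l.filter (fun x => key x == w)).foldl f (d.getD w dflt) := by
  induction l generalizing d with
  | nil => rfl
  | cons x t ih =>
    simp only [List.foldl_cons]
    rw [ih]
    by_cases h : (key x == w) = true
    · have hkx : key x = w := eq_of_beq h
      rw [List.filter_cons_of_pos (p := fun x => key x == w) h, List.foldl_cons, hkx,
        PySem.Dict.getD_insert_self]
    · rw [List.filter_cons_of_neg (p := fun x => key x == w) (by simp [h]),
        PySem.Dict.getD_insert]
      have hne : ¬ (w = key x) := fun hw => h (by simp [hw])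
      rw [if_neg hne]

-- count of one lang among one word's events equals the pair count
theorem pv_count_snd (ev : List (String × String)) (w l : String) :
    List.count l (pvLangsOf ev w) = List.count (w, l) ev := by
  unfold pvLangsOf
  simp only [List.count_eq_countP, List.countP_map, List.countP_filter, Function.comp]
  refine List.countP_congr (fun e _ => ?_)
  obtain ⟨a, b⟩ := e
  by_cases h1 : a = w <;> by_cases h2 : b = l <;> simp [h1, h2, Prod.ext_iff]

-- A's accumulated nested dict over the event stream
def pvCntA (ev : List (String × String)) : PySem.Dict String (PySem.Dict String Int) :=
  ev.foldl pvAStepN PySem.Dict.empty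

-- B's nested dict rebuilt from the flat counter
def pvCntB (ev : List (String × String)) : PySem.Dict String (PySem.Dict String Int) :=
  (PySem.Dict.counter ev).items.foldl pvBStepN PySem.Dict.empty

theorem pv_keys_A (ev : List (String × String)) :
    (pvCntA ev).keys = PySem.Set.ofList (ev.map (fun e => e.1)) := by
  unfold pvCntA pvAStepN
  rw [PySem.Dict.keys_foldl_insert_key ev (fun e => e.1)
      (fun (d : PySem.Dict String (PySem.Dict String Int)) (e : String × String) =>
        (d.getD e.1 PySem.Dict.empty).insert e.2 ((d.getD e.1 PySem.Dict.empty).getD e.2 0 + 1)),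
    PySem.Dict.keys_empty, PySem.Set.update_nil_left]

theorem pv_keys_B (ev : List (String × String)) :
    (pvCntB ev).keys = PySem.Set.ofList (ev.map (fun e => e.1)) := by
  unfold pvCntB pvBStepN
  rw [PySem.Dict.keys_foldl_insert_key _ (fun (q : (String × String) × Int) => q.1.1)
      (fun (nd : PySem.Dict String (PySem.Dict String Int)) (q : (String × String) × Int) =>
        (nd.getD q.1.1 PySem.Dict.empty).insert q.1.2 q.2),
    PySem.Dict.keys_empty, PySem.Set.update_nil_left, PySem.Dict.items_counter, List.map_map]
  rw [show ((fun (q : (String × String) × Int) => q.1.1) ∘ fun k => (k, (List.count k ev : Int)))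
      = fun (e : String × String) => e.1 from rfl, pv_ofList_map_ofList]

theorem pv_getD_A (ev : List (String × String)) (w : String) :
    (pvCntA ev).getD w PySem.Dict.empty = PySem.Dict.counter (pvLangsOf ev w) := by
  unfold pvCntA pvAStepN
  rw [pv_getD_foldl_insert_filter (fun (e : String × String) => e.1)
      (fun (v : PySem.Dict String Int) (e : String × String) => v.insert e.2 (v.getD e.2 0 + 1))
      PySem.Dict.empty,
    PySem.Dict.getD_empty,
    ← PySem.Dict.foldl_insert_getD_add_one_eq_counter (pvLangsOf ev w)]
  unfold pvLangsOf
  simp only [List.foldl_map]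

theorem pv_getD_B (ev : List (String × String)) (w : String) :
    (pvCntB ev).getD w PySem.Dict.empty = PySem.Dict.counter (pvLangsOf ev w) := by
  unfold pvCntB pvBStepN
  rw [pv_getD_foldl_insert_filter (fun (q : (String × String) × Int) => q.1.1)
      (fun (v : PySem.Dict String Int) (q : (String × String) × Int) => v.insert q.1.2 q.2)
      PySem.Dict.empty,
    PySem.Dict.getD_empty, PySem.Dict.items_counter, List.filter_map]
  rw [show ((fun (q : (String × String) × Int) => q.1.1 == w) ∘ fun k => (k, (List.count k ev : Int)))
      = fun (e : String × String) => e.1 == w from rfl]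
  simp only [List.foldl_map]
  rw [← pv_ofList_filter]
  have hinj : ∀ a ∈ ev.filter (fun e => e.1 == w), ∀ b ∈ ev.filter (fun e => e.1 == w),
      a.2 = b.2 → a = b := by
    intro a ha b hb h2
    have ha1 : a.1 = w := eq_of_beq (List.mem_filter.mp ha).2
    have hb1 : b.1 = w := eq_of_beq (List.mem_filter.mp hb).2
    exact Prod.ext_iff.mpr ⟨ha1.trans hb1.symm, h2⟩
  have hS2 : (PySem.Set.ofList (ev.filter (fun e => e.1 == w))).map (fun e => e.2)
      = PySem.Set.ofList (pvLangsOf ev w) :=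
    (pv_ofList_map_inj (fun e => e.2) (ev.filter (fun e => e.1 == w)) hinj).symm
  have hmemw : ∀ a ∈ PySem.Set.ofList (ev.filter (fun e => e.1 == w)), a.1 = w := by
    intro a ha
    exact eq_of_beq (List.mem_filter.mp ((PySem.Set.mem_ofList _ a).mp ha)).2
  apply PySem.Dict.ext
  rw [PySem.Dict.items_foldl_insert_fresh (PySem.Set.ofList (ev.filter (fun e => e.1 == w)))
      (fun a => a.2) (fun a => (List.count a ev : Int)) PySem.Dict.empty
      (fun a _ => PySem.Dict.contains_empty _) (by rw [hS2]; exact PySem.Set.nodup_ofList _),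
    PySem.Dict.items_counter, ← hS2, List.map_map]
  simp only [PySem.Dict.empty.eq_1, List.nil_append]
  refine List.map_congr_left (fun a ha => ?_)
  simp only [Function.comp]
  rw [pv_count_snd, ← hmemw a ha, Prod.mk.eta]

theorem pv_nested_eq (ev : List (String × String)) : pvCntA ev = pvCntB ev := by
  have hndA : (pvCntA ev).keys.Nodup := by rw [pv_keys_A]; exact PySem.Set.nodup_ofList _
  have hndB : (pvCntB ev).keys.Nodup := by rw [pv_keys_B]; exact PySem.Set.nodup_ofList _
  apply PySem.Dict.ext
  rw [PySem.Dict.items_eq_map_keys _ hndA PySem.Dict.empty,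
    PySem.Dict.items_eq_map_keys _ hndB PySem.Dict.empty, pv_keys_A, pv_keys_B]
  refine List.map_congr_left (fun w _ => ?_)
  rw [pv_getD_A, pv_getD_B]

-- ===== VERDICT (by name: the statement is the Claim_ definition above) =====
theorem accumulate_chunk_py_spec : Claim_equal_accumulate_chunk_py := by
  intro payload _
  unfold Spec_accumulate_chunk_py
  show accumulate_chunk_py payload = accumulate_chunk_py_alt payload
  simp only [accumulate_chunk_py, accumulate_chunk_py_alt]
  rw [PySem.List.foldl_prod_mk (fun d (p : String × List String) => p.2.foldl (pyAWordStep p.1) d)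
      (fun s (p : String × List String) => PySem.Set.add s p.1),
    PySem.List.foldl_prod_mk (fun d (p : String × List String) => p.2.foldl (pyBPairStep p.1) d)
      (fun s (p : String × List String) => PySem.Set.add s p.1)]
  have hA : (payload.1.zip payload.2).foldl
        (fun d (p : String × List String) => p.2.foldl (pyAWordStep p.1) d) PySem.Dict.empty
      = pvCntA (pvEvents payload) := by
    rw [pv_foldl_zip_flatMap pyAWordStep]
    unfold pvCntA pvEvents
    rw [show (fun (st : PySem.Dict String (PySem.Dict String Int)) (e : String × String) =>
        pyAWordStep e.2 st e.1) = pvAStepN from funext fun d => funext fun e => pyAWordStep_eq d e]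
  have hB : (payload.1.zip payload.2).foldl
        (fun d (p : String × List String) => p.2.foldl (pyBPairStep p.1) d) PySem.Dict.empty
      = PySem.Dict.counter (pvEvents payload) := by
    rw [pv_foldl_zip_flatMap pyBPairStep]
    unfold pvEvents
    rw [show (fun (st : PySem.Dict (String × String) Int) (e : String × String) =>
        pyBPairStep e.2 st e.1) = (fun d e => d.insert e (d.getD e 0 + 1)) from
      funext fun d => funext fun e => by unfold pyBPairStep; rfl]
    exact PySem.Dict.foldl_insert_getD_add_one_eq_counter _
  rw [hA, hB, show pyBNestStep = pvBStepN from funext fun nd => funext fun q => pyBNestStep_eq nd q]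
  rw [show (PySem.Dict.counter (pvEvents payload)).items.foldl pvBStepN PySem.Dict.empty
      = pvCntB (pvEvents payload) from rfl, pv_nested_eq]
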